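-- pv_equiv track=rewrite | github.com/ipaste01/ThesisUCY-QAOA | Algorithm-2/TSP.py | common_node
-- ===== SOURCE A (Python) =====
-- def common_node(x,y):
--     d = 0
--     if (len(x)!= len(y)):
--      return 0;
--
--     for i in range(len(x)):
--       if (x[i] == y[i]) and (x[i] == 1):
--         return 1;
--
--     return 0
-- ===== SOURCE B (Python) =====
-- def common_node(x, y):
--     if len(x) != len(y):
--         return 0
--     ones_x = {i for i, v in enumerate(x) if v == 1}
--     ones_y = {i for i, v in enumerate(y) if v == 1}
--     return 1 if ones_x & ones_y else 0
-- ===== Notes on version B (the rewrite author's own statement) =====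
-- stated objective: alternative
-- what changed: Replaces the fused index-loop with early return by building the two sets of indices holding 1 and testing their intersection for non-emptiness.
import Mathlib
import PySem

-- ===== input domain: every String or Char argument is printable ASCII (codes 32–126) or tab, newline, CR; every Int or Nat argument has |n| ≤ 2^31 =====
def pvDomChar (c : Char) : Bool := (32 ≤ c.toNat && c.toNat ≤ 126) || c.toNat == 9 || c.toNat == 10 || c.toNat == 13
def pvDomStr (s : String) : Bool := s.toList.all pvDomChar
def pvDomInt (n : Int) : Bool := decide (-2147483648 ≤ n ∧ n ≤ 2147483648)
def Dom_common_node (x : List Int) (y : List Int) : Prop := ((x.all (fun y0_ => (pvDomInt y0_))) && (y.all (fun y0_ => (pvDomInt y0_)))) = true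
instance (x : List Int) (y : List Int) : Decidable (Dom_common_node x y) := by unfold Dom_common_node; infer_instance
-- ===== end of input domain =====

-- B replaces A's fused early-exit index scan by building the two index sets of positions
-- holding 1 and testing their intersection (objective: alternative decomposition).

-- ===== PORT A =====
-- the for-loop with early 'return 1'; indices come from range(len(x)), so pyGetD's
-- default is never used (i is always in range)
def commonLoopA (x : List Int) (y : List Int) : List Int → Int
  | [] => 0
  | i :: rest =>
    if (PySem.List.pyGetD x i 0 == PySem.List.pyGetD y i 0) && (PySem.List.pyGetD x i 0 == 1) then 1
    else commonLoopA x y rest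

def common_node (x : List Int) (y : List Int) : Int :=
  if x.length ≠ y.length then 0
  else commonLoopA x y (PySem.List.pyRange 0 x.length 1)

-- ===== PORT B =====
def onesIdx (l : List Int) : PySem.Set Int :=
  PySem.Set.ofList ((PySem.List.enumerate l).filterMap (fun p => if p.2 == 1 then some p.1 else none))

def common_node_alt (x : List Int) (y : List Int) : Int :=
  if x.length ≠ y.length then 0
  else if PySem.Set.inter (onesIdx x) (onesIdx y) ≠ [] then 1 else 0

-- ===== PRECONDITION & SPEC =====
def Spec_common_node (x : List Int) (y : List Int) (out : Int) : Prop := out = common_node_alt x y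
instance (x : List Int) (y : List Int) (out : Int) : Decidable (Spec_common_node x y out) := by unfold Spec_common_node; infer_instance

-- ===== CLAIM (what is proved, stated in full; the proofs are below) =====
def Claim_equal_common_node : Prop := ∀ (x : List Int) (y : List Int), Dom_common_node x y → Spec_common_node x y (common_node x y)

-- ===== LEMMAS AND PROOFS =====

theorem commonLoopA_eq_any (x y : List Int) (l : List Int) :
    commonLoopA x y l =
      (if l.any (fun i => (PySem.List.pyGetD x i 0 == PySem.List.pyGetD y i 0) && (PySem.List.pyGetD x i 0 == 1)) then 1 else 0) := by
  induction l with
  | nil => simp [commonLoopA]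
  | cons i rest ih =>
    simp only [commonLoopA, List.any_cons, Bool.or_eq_true]
    by_cases h : ((PySem.List.pyGetD x i 0 == PySem.List.pyGetD y i 0) && (PySem.List.pyGetD x i 0 == 1)) = true <;>
      simp [h, ih]

theorem mem_onesIdx (l : List Int) (i : Int) :
    i ∈ onesIdx l ↔ ∃ (k : Nat) (h : k < l.length), i = k ∧ l[k] = 1 := by
  unfold onesIdx
  rw [PySem.Set.mem_ofList, List.mem_filterMap]
  constructor
  · rintro ⟨p, hp, hf⟩
    rw [PySem.List.mem_enumerate_iff] at hp
    obtain ⟨k, hk, rfl⟩ := hp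
    by_cases h1 : l[k] = 1
    · exact ⟨k, hk, by simp [h1] at hf; omega, h1⟩
    · simp [h1] at hf
  · rintro ⟨k, hk, rfl, h1⟩
    exact ⟨((k : Int), l[k]), by rw [PySem.List.mem_enumerate_iff]; exact ⟨k, hk, by simp⟩, by simp [h1]⟩

theorem inter_ne_nil_iff (s t : List Int) :
    PySem.Set.inter s t ≠ [] ↔ ∃ a, a ∈ s ∧ a ∈ t := by
  constructor
  · intro h
    obtain ⟨a, ha⟩ := List.exists_mem_of_ne_nil _ h
    have := (PySem.Set.mem_inter s t a).mp ha
    exact ⟨a, this⟩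
  · rintro ⟨a, hs, ht⟩ h
    have : a ∈ PySem.Set.inter s t := (PySem.Set.mem_inter s t a).mpr ⟨hs, ht⟩
    simp [h] at this

-- ===== VERDICT (by name: the statement is the Claim_ definition above) =====
theorem common_node_spec : Claim_equal_common_node := by
  intro x y _
  unfold Spec_common_node common_node common_node_alt
  by_cases hlen : x.length ≠ y.length
  · simp [hlen]
  · rw [not_not] at hlen
    simp only [hlen, ne_eq, not_true_eq_false, if_false]
    rw [commonLoopA_eq_any]
    congr 1
    simp only [eq_iff_iff, List.any_eq_true]
    rw [← ne_eq, inter_ne_nil_iff]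
    constructor
    · rintro ⟨i, hi, hcond⟩
      rw [PySem.List.mem_pyRange_one] at hi
      obtain ⟨h0, hl⟩ := hi
      rw [Bool.and_eq_true, beq_iff_eq, beq_iff_eq] at hcond
      have hx := PySem.List.pyGetD_eq_getElem x 0 h0 (by omega : i < (x.length : Int))
      have hy := PySem.List.pyGetD_eq_getElem y 0 h0 (by omega : i < (y.length : Int))
      refine ⟨i, ?_, ?_⟩
      · rw [mem_onesIdx]
        exact ⟨i.toNat, by omega, by omega, by rw [← hx, hcond.2]⟩
      · rw [mem_onesIdx]
        exact ⟨i.toNat, by omega, by omega, by rw [← hy, ← hcond.1, hcond.2]⟩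
    · rintro ⟨a, hax, hay⟩
      rw [mem_onesIdx] at hax hay
      obtain ⟨k, hk, rfl, hx1⟩ := hax
      obtain ⟨k', hk', hkk, hy1⟩ := hay
      have hkk2 : k = k' := by omega
      subst hkk2
      refine ⟨(k : Int), ?_, ?_⟩
      · rw [PySem.List.mem_pyRange_one]
        constructor
        · omega
        · omega
      · rw [Bool.and_eq_true, beq_iff_eq, beq_iff_eq]
        rw [PySem.List.pyGetD_natCast, PySem.List.pyGetD_natCast]
        constructor
        · rw [List.getD_eq_getElem?_getD, List.getD_eq_getElem?_getD]
          simp [hk, hk', hx1, hy1]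
        · rw [List.getD_eq_getElem?_getD]
          simp [hk, hx1]
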